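-- pv_equiv track=rewrite | github.com/mattrobball/BridgelandStability | scripts/generate_site.py | group_modules
-- ===== SOURCE A (Python) =====
-- from collections import defaultdict
--
-- def group_modules(by_module: dict, prefix: str) -> dict[str, list[str]]:
--     """Group module names by their top-level component after stripping prefix.
--
--     Returns dict: group_name -> sorted list of full module names.
--     """
--     groups: dict[str, list[str]] = defaultdict(list)
--     prefix_parts = prefix.split(".")
--     for mod in by_module:
--         parts = mod.split(".")
--         if parts[: len(prefix_parts)] == prefix_parts:
--             remainder = parts[len(prefix_parts):]
--         else:
--             remainder = parts
--         group = remainder[0] if remainder else mod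
--         groups[group].append(mod)
--     # Sort modules within each group
--     for g in groups:
--         groups[g].sort()
--     return dict(groups)
-- ===== SOURCE B (Python) =====
-- def group_modules(by_module: dict, prefix: str) -> dict[str, list[str]]:
--     """Recursive partition: peel off the first remaining module's group, emit that
--     group with its sorted members, and recurse on the modules of other groups."""
--     pparts = prefix.split(".")
--
--     def key(mod):
--         parts = mod.split(".")
--         rem = parts[len(pparts):] if parts[: len(pparts)] == pparts else parts
--         return rem[0] if rem else mod
--
--     def go(mods):
--         if not mods:
--             return []
--         g = key(mods[0])
--         return [(g, sorted([m for m in mods if key(m) == g]))] + go(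
--             [m for m in mods if key(m) != g]
--         )
--
--     return dict(go(list(by_module)))
-- ===== Notes on version B (the rewrite author's own statement) =====
-- stated objective: alternative
-- what changed: Replaces A's two staged passes (a defaultdict-append loop over all modules followed by an in-place sort of every group) by a recursive partition: peel off the first remaining module's group key, emit that group with its members collected and sorted in one step, and recurse on the modules belonging to the other groups.
import Mathlib
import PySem

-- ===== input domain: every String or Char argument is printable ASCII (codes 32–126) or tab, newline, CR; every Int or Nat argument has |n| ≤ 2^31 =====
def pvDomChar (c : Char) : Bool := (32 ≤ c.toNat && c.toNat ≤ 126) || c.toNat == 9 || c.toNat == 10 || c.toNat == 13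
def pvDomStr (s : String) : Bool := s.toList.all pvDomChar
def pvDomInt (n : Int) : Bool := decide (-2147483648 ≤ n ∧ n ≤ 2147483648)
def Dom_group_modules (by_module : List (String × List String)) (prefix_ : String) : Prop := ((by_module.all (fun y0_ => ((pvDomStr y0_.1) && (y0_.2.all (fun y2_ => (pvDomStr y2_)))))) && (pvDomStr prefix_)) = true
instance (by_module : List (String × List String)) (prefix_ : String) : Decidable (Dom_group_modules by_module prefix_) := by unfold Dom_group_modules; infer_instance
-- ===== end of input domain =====

-- B replaces A's defaultdict-append loop + per-group in-place sort loop by a recursive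
-- partition: peel the first remaining module's group off, emit it with its members sorted,
-- and recurse on the modules of the other groups (objective: alternative).


-- ===== PORT A =====
-- A computes the group key inline in its loop body; named here for readability (same steps).
def aGroupKey (prefix_parts : List String) (mod : String) : String :=
  let parts := (PySem.Str.split? mod ".").getD []
  let remainder := if parts.take prefix_parts.length == prefix_parts
                   then parts.drop prefix_parts.length else parts
  match remainder with
  | [] => mod
  | g :: _ => g

def group_modules (by_module : List (String × List String)) (prefix_ : String) : List (String × List String) :=
  let prefix_parts := (PySem.Str.split? prefix_ ".").getD []
  -- for mod in by_module: groups[group].append(mod)   (defaultdict(list))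
  let groups : PySem.Dict String (List String) :=
    by_module.foldl (fun d p => d.modify (aGroupKey prefix_parts p.1) [] (· ++ [p.1]))
      PySem.Dict.empty
  -- for g in groups: groups[g].sort()
  let groups2 :=
    groups.keys.foldl (fun d g => d.modify g [] (fun l => PySem.List.sorted l (fun x => x) false))
      groups
  groups2.items

-- ===== PORT B =====
-- Source B's nested helper `key`
def bKey (pparts : List String) (mod : String) : String :=
  let parts := (PySem.Str.split? mod ".").getD []
  (if parts.take pparts.length == pparts then parts.drop pparts.length else parts).headD mod

-- Source B's nested recursion `go`: emit the head module's group with its sorted members,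
-- recurse on the modules belonging to other groups
def bGo (pparts : List String) (mods : List String) : List (String × List String) :=
  match mods with
  | [] => []
  | m :: rest =>
    let g := bKey pparts m
    (g, PySem.List.sorted ((m :: rest).filter (fun x => bKey pparts x == g)) (fun x => x) false)
      :: bGo pparts ((m :: rest).filter (fun x => !(bKey pparts x == g)))
termination_by mods.length
decreasing_by
  simp only [List.filter_cons, beq_self_eq_true, Bool.not_true, Bool.false_eq_true, if_false]
  have := List.length_filter_le (fun x => !(bKey pparts x == bKey pparts m)) rest
  simp only [List.length_cons]
  omega

-- return dict(go(list(by_module)))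
def group_modules_alt (by_module : List (String × List String)) (prefix_ : String) : List (String × List String) :=
  let pparts := (PySem.Str.split? prefix_ ".").getD []
  (PySem.Dict.ofList (bGo pparts (by_module.map (·.1)))).items

-- ===== PRECONDITION & SPEC =====
def Spec_group_modules (by_module : List (String × List String)) (prefix_ : String) (out : List (String × List String)) : Prop := out = group_modules_alt by_module prefix_
instance (by_module : List (String × List String)) (prefix_ : String) (out : List (String × List String)) : Decidable (Spec_group_modules by_module prefix_ out) := by unfold Spec_group_modules; infer_instance

-- ===== CLAIM (what is proved, stated in full; the proofs are below) =====
def Claim_equal_group_modules : Prop := ∀ (by_module : List (String × List String)) (prefix_ : String), Dom_group_modules by_module prefix_ → Spec_group_modules by_module prefix_ (group_modules by_module prefix_)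

-- ===== LEMMAS AND PROOFS =====

-- List.headD as the two-branch match A's port writes out
theorem headD_match (l : List String) (d : String) :
    l.headD d = (match l with | [] => d | g :: _ => g) := by cases l <;> rfl

-- the two ports compute the same group key
theorem keyFun_eq : @bKey = @aGroupKey := by
  funext pp m
  simp only [bKey, aGroupKey, headD_match]

-- the normal form both ports reduce to: distinct group keys in first-occurrence order,
-- each paired with the sorted members of its group
def midForm (pp : List String) (mods : List String) : List (String × List String) :=
  (PySem.Set.ofList (mods.map (bKey pp))).map
    (fun g => (g, PySem.List.sorted (mods.filter (fun m => bKey pp m == g)) (fun x => x) false))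

-- set(…) commutes with filter (first occurrences of a filtered list = filtered first occurrences)
theorem ofList_filter (xs : List String) (q : String → Bool) :
    PySem.Set.ofList (xs.filter q) = (PySem.Set.ofList xs).filter q := by
  induction xs with
  | nil => rfl
  | cons y ys ih =>
    by_cases hy : q y = true
    · rw [List.filter_cons_of_pos hy, PySem.Set.ofList_cons, PySem.Set.ofList_cons, ih]
      simp only [PySem.Set.discard, List.filter_cons_of_pos hy, List.filter_filter]
      exact congrArg (y :: ·) (List.filter_congr (fun a _ => by rw [Bool.and_comm]))
    · rw [List.filter_cons_of_neg (by simpa using hy), PySem.Set.ofList_cons, ih]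
      simp only [PySem.Set.discard, List.filter_cons, hy, List.filter_filter]
      simp only [Bool.false_eq_true, if_false]
      apply List.filter_congr
      intro a _
      cases ha : a == y with
      | true => have : a = y := eq_of_beq ha; subst this; simpa using hy
      | false => simp

-- Source B's recursion computes the normal form
theorem bGo_eq_midForm (pp : List String) (mods : List String) :
    bGo pp mods = midForm pp mods := by
  induction mods using bGo.induct pp with
  | case1 => rw [bGo]; rfl
  | case2 m rest g0 ih =>
    rw [bGo]
    have ih' : bGo pp (List.filter (fun x => !(bKey pp x == bKey pp m)) (m :: rest))
        = midForm pp (List.filter (fun x => !(bKey pp x == bKey pp m)) (m :: rest)) := ih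
    rw [ih', midForm, midForm]
    have hS : PySem.Set.ofList ((m :: rest).map (bKey pp)) =
        bKey pp m :: ((PySem.Set.ofList (rest.map (bKey pp))).filter (fun y => !(y == bKey pp m))) := by
      rw [List.map_cons, PySem.Set.ofList_cons]
      rfl
    have hmapR : (List.filter (fun x => !(bKey pp x == bKey pp m)) (m :: rest)).map (bKey pp)
        = ((m :: rest).map (bKey pp)).filter (fun y => !(y == bKey pp m)) := by
      rw [List.filter_map]
      rfl
    have hRS : PySem.Set.ofList ((List.filter (fun x => !(bKey pp x == bKey pp m)) (m :: rest)).map (bKey pp))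
        = (PySem.Set.ofList (rest.map (bKey pp))).filter (fun y => !(y == bKey pp m)) := by
      rw [hmapR, ofList_filter, hS]
      simp only [List.filter_cons, beq_self_eq_true, Bool.not_true, Bool.false_eq_true, if_false,
        List.filter_filter, Bool.and_self]
    rw [hRS, hS, List.map_cons]
    congr 1
    apply List.map_congr_left
    intro g' hg'
    have hq : (g' == bKey pp m) = false := by
      have := List.of_mem_filter hg'
      simpa using this
    have hfil : (List.filter (fun x => !(bKey pp x == bKey pp m)) (m :: rest)).filter (fun x => bKey pp x == g')
        = (m :: rest).filter (fun x => bKey pp x == g') := by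
      rw [List.filter_filter]
      apply List.filter_congr
      intro x _
      cases hx : (bKey pp x == g') with
      | true =>
        have hxe : bKey pp x = g' := eq_of_beq hx
        rw [hxe]
        simp [hq]
      | false => simp
    rw [hfil]

-- dict() of an association list with pairwise-distinct keys is that list
theorem items_ofList_of_nodup (l : List (String × List String))
    (h : (l.map Prod.fst).Nodup) : (PySem.Dict.ofList l).items = l := by
  have := PySem.Dict.items_foldl_insert_fresh l Prod.fst Prod.snd PySem.Dict.empty
    (fun a _ => PySem.Dict.contains_empty _) h
  simpa [PySem.Dict.ofList, PySem.Dict.update] using this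

-- the sorting loop, pointwise: sorts the entry at every key of a Nodup list, leaves others
theorem getD_sort_loop (ks : List String) (d : PySem.Dict String (List String)) (g : String)
    (hnd : ks.Nodup) :
    (ks.foldl (fun d g' => d.modify g' [] (fun l => PySem.List.sorted l (fun x => x) false)) d).getD g []
      = if g ∈ ks then PySem.List.sorted (d.getD g []) (fun x => x) false else d.getD g [] := by
  induction ks generalizing d with
  | nil => simp
  | cons k ks ih =>
    have hk : k ∉ ks := (List.nodup_cons.mp hnd).1
    have hnd' : ks.Nodup := (List.nodup_cons.mp hnd).2
    simp only [List.foldl_cons, ih _ hnd', PySem.Dict.getD_modify]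
    by_cases hgk : g = k
    · subst hgk
      simp [hk]
    · simp [hgk, List.mem_cons]

-- A's loops also compute the normal form
theorem group_modules_eq_midForm (by_module : List (String × List String)) (prefix_ : String) :
    group_modules by_module prefix_
      = midForm ((PySem.Str.split? prefix_ ".").getD []) (by_module.map (·.1)) := by
  simp only [group_modules, midForm, keyFun_eq]
  set pp := (PySem.Str.split? prefix_ ".").getD [] with hpp
  set kf := aGroupKey pp with hkf
  set D : PySem.Dict String (List String) :=
    by_module.foldl (fun d p => d.modify (kf p.1) [] (· ++ [p.1])) PySem.Dict.empty with hD
  set mods := by_module.map (·.1) with hmods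
  -- keys of D: the distinct group keys in first-occurrence order
  have hkeys : D.keys = PySem.Set.ofList (mods.map kf) := by
    have h1 := PySem.Dict.keys_foldl_modify_key by_module (fun p => kf p.1)
      ([] : List String) (fun d p l => l ++ [p.1]) PySem.Dict.empty
    simpa [hD, hmods, List.map_map, Function.comp_def, PySem.Set.update_nil_left] using h1
  have hndD : D.keys.Nodup := by rw [hkeys]; exact PySem.Set.nodup_ofList _
  -- contents of D: for each group key, the members that map to it, in order
  have hgetD : ∀ g, D.getD g [] = mods.filter (fun m => kf m == g) := by
    intro g
    have hDpairs : D = (mods.map (fun m => ((kf m, m) : String × String))).foldl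
        (fun d p => d.modify p.1 [] (· ++ [p.2])) PySem.Dict.empty := by
      rw [hD, hmods, List.foldl_map, List.foldl_map]
    rw [hDpairs, PySem.Dict.getD_foldl_modify_append]
    simp [List.filter_map, Function.comp_def]
  set D2 := D.keys.foldl (fun d g => d.modify g [] (fun l => PySem.List.sorted l (fun x => x) false)) D with hD2
  have hupd : PySem.Set.update D.keys D.keys = D.keys := by
    rw [PySem.Set.update_eq_append_filter]
    have hnil : List.filter (fun y => !PySem.Set.contains D.keys y) (PySem.Set.ofList D.keys) = [] := by
      apply List.filter_eq_nil_iff.mpr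
      intro y hy
      simpa using (PySem.Set.mem_ofList D.keys y).mp hy
    rw [hnil, List.append_nil]
  have hkeys2 : D2.keys = D.keys := by
    have h2 := PySem.Dict.keys_foldl_modify D.keys ([] : List String)
      (fun d g l => PySem.List.sorted l (fun x => x) false) D
    simpa [hD2, hupd] using h2
  have hnd2 : D2.keys.Nodup := by rw [hkeys2]; exact hndD
  have hitems : D2.items = D2.keys.map (fun g => (g, D2.getD g [])) :=
    PySem.Dict.items_eq_map_keys D2 hnd2 []
  rw [hitems, hkeys2, hkeys]
  apply List.map_congr_left
  intro g hg
  have hgD : g ∈ D.keys := by rw [hkeys]; exact hg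
  rw [hD2, getD_sort_loop D.keys D g hndD, if_pos hgD, hgetD g]

theorem group_modules_eq (by_module : List (String × List String)) (prefix_ : String) :
    group_modules by_module prefix_ = group_modules_alt by_module prefix_ := by
  have hnd : ((midForm ((PySem.Str.split? prefix_ ".").getD []) (by_module.map (·.1))).map Prod.fst).Nodup := by
    simp only [midForm, List.map_map, Function.comp_def, List.map_id']
    exact PySem.Set.nodup_ofList _
  rw [group_modules_eq_midForm]
  simp only [group_modules_alt]
  rw [bGo_eq_midForm, items_ofList_of_nodup _ hnd]

-- ===== VERDICT (by name: the statement is the Claim_ definition above) =====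
theorem group_modules_spec : Claim_equal_group_modules := by
  intro by_module prefix_ _
  unfold Spec_group_modules
  exact group_modules_eq by_module prefix_
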